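-- pv_equiv track=rewrite | github.com/IncognitoPeter/informatyka_korki | moduł_1_int/zestaw_5/zadania_lvl_1.py | rozklad_na_czynniki_z_jedna_wspolna
-- ===== SOURCE A (Python) =====
-- def rozklad_na_czynniki(liczba):
--     dzielnik = 2
--     czynniki = 0
--     mnoznik = 1
--     while liczba > 1:
--         if liczba % dzielnik == 0:
--             czynniki += dzielnik * mnoznik
--             mnoznik *= 10
--             liczba //= dzielnik
--         else:
--             dzielnik += 1
--     return czynniki
--
-- def rozklad_na_czynniki_z_jedna_wspolna(liczba_1, liczba_2):
--     czynniki_1 = rozklad_na_czynniki(liczba_1)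
--     czynniki_2 = rozklad_na_czynniki(liczba_2)
--     wspolny_czynnik = 0
--     while czynniki_1 > 0 and czynniki_2 > 0:
--         cyfra_1 = czynniki_1 % 10
--         cyfra_2 = czynniki_2 % 10
--         if cyfra_1 == cyfra_2 and cyfra_1 != 0:
--             wspolny_czynnik += 1
--         czynniki_1 //= 10
--         czynniki_2 //= 10
--     if wspolny_czynnik == 1:
--         return True
--     else:
--         return False
-- ===== SOURCE B (Python) =====
-- def rozklad_na_czynniki_z_jedna_wspolna(liczba_1, liczba_2):
--     def factor_code(n):
--         # prime factorisation by trial division up to sqrt(n); each factor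
--         # occupies the next decimal place of the code
--         code = 0
--         place = 1
--         d = 2
--         while d * d <= n:
--             if n % d == 0:
--                 code += d * place
--                 place *= 10
--                 n //= d
--             else:
--                 d += 1
--         if n > 1:
--             code += n * place
--         return code
--
--     def digits(c):
--         ds = []
--         while c > 0:
--             ds.append(c % 10)
--             c //= 10
--         return ds
--
--     c1 = factor_code(liczba_1)
--     c2 = factor_code(liczba_2)
--     common = sum(1 for a, b in zip(digits(c1), digits(c2)) if a == b and a != 0)
--     return common == 1
-- ===== Notes on version B (the rewrite author's own statement) =====
-- stated objective: faster
-- what changed: B factors each number by trial division only up to sqrt(n) (the leftover cofactor after the loop is the last prime factor), accumulating the decimal factor code directly, and counts matching positions by zipping the two digit lists, instead of A's O(n) divisor scan and lockstep integer-peeling while-loop.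
import Mathlib
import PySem

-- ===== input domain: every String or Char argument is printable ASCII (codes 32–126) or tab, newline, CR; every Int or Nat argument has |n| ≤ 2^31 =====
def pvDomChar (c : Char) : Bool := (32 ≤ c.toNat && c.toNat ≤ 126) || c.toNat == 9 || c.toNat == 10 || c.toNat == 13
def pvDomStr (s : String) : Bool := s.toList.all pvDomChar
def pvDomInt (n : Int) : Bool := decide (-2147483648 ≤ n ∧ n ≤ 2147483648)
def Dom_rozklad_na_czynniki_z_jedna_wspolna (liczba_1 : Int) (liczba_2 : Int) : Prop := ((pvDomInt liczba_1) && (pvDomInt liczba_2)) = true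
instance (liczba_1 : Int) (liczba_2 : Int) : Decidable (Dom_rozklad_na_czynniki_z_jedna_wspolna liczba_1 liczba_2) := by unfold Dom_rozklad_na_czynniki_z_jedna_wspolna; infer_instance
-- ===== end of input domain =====

-- B replaces A's linear divisor scan by trial division up to sqrt(n) (the leftover cofactor is
-- the last prime factor) and counts matching positions over zipped digit lists (objective: faster).

-- ===== PORT A =====
-- A's inner while-loop of `rozklad_na_czynniki`; the fuel only makes the recursion total
-- (2*liczba.toNat+1 steps provably suffice, see pvAFactLoop_eq below).
def pvAFactLoop (fuel : Nat) (liczba dzielnik czynniki mnoznik : Int) : Int :=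
  match fuel with
  | 0 => czynniki
  | fuel + 1 =>
    if 1 < liczba then
      if PySem.Int.mod liczba dzielnik = 0 then
        pvAFactLoop fuel (PySem.Int.floordiv liczba dzielnik) dzielnik
          (czynniki + dzielnik * mnoznik) (mnoznik * 10)
      else
        pvAFactLoop fuel liczba (dzielnik + 1) czynniki mnoznik
    else czynniki

-- A's helper `rozklad_na_czynniki`
def pvRozklad (liczba : Int) : Int := pvAFactLoop (2 * liczba.toNat + 1) liczba 2 0 1

-- A's comparison while-loop
def pvACmpLoop (czynniki_1 czynniki_2 wspolny : Int) : Int :=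
  if h : 0 < czynniki_1 ∧ 0 < czynniki_2 then
    pvACmpLoop (PySem.Int.floordiv czynniki_1 10) (PySem.Int.floordiv czynniki_2 10)
      (if PySem.Int.mod czynniki_1 10 = PySem.Int.mod czynniki_2 10 ∧ PySem.Int.mod czynniki_1 10 ≠ 0
       then wspolny + 1 else wspolny)
  else wspolny
termination_by czynniki_1.toNat
decreasing_by
  rw [PySem.Int.floordiv_eq_ediv_of_pos (by norm_num : (0:Int) < 10)]
  omega

def rozklad_na_czynniki_z_jedna_wspolna (liczba_1 : Int) (liczba_2 : Int) : Bool :=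
  let czynniki_1 := pvRozklad liczba_1
  let czynniki_2 := pvRozklad liczba_2
  if pvACmpLoop czynniki_1 czynniki_2 0 = 1 then true else false

-- ===== PORT B =====
-- B's trial-division loop (while d*d <= n), accumulating the decimal factor code directly;
-- fuel n.toNat provably suffices (pvBFactLoop_eq).
def pvBFactLoop (fuel : Nat) (n d code place : Int) : Int :=
  match fuel with
  | 0 => code
  | fuel + 1 =>
    if d * d ≤ n then
      if PySem.Int.mod n d = 0 then
        pvBFactLoop fuel (PySem.Int.floordiv n d) d (code + d * place) (place * 10)
      else
        pvBFactLoop fuel n (d + 1) code place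
    else if 1 < n then code + n * place else code

-- B's `factor_code`
def pvFactorCode (n : Int) : Int := pvBFactLoop n.toNat n 2 0 1

-- B's `digits`
def pvDigits (c : Int) : List Int :=
  if _h : 0 < c then PySem.Int.mod c 10 :: pvDigits (PySem.Int.floordiv c 10) else []
termination_by c.toNat
decreasing_by
  rw [PySem.Int.floordiv_eq_ediv_of_pos (by norm_num : (0:Int) < 10)]
  omega

def rozklad_na_czynniki_z_jedna_wspolna_alt (liczba_1 : Int) (liczba_2 : Int) : Bool :=
  let c1 := pvFactorCode liczba_1
  let c2 := pvFactorCode liczba_2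
  let common := ((pvDigits c1).zip (pvDigits c2)).countP (fun p => p.1 == p.2 && p.1 != 0)
  common == 1

-- ===== PRECONDITION & SPEC =====
def Spec_rozklad_na_czynniki_z_jedna_wspolna (liczba_1 : Int) (liczba_2 : Int) (out : Bool) : Prop := out = rozklad_na_czynniki_z_jedna_wspolna_alt liczba_1 liczba_2
instance (liczba_1 : Int) (liczba_2 : Int) (out : Bool) : Decidable (Spec_rozklad_na_czynniki_z_jedna_wspolna liczba_1 liczba_2 out) := by unfold Spec_rozklad_na_czynniki_z_jedna_wspolna; infer_instance

-- ===== CLAIM (what is proved, stated in full; the proofs are below) =====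
def Claim_equal_rozklad_na_czynniki_z_jedna_wspolna : Prop := ∀ (liczba_1 : Int) (liczba_2 : Int), Dom_rozklad_na_czynniki_z_jedna_wspolna liczba_1 liczba_2 → Spec_rozklad_na_czynniki_z_jedna_wspolna liczba_1 liczba_2 (rozklad_na_czynniki_z_jedna_wspolna liczba_1 liczba_2)

-- ===== LEMMAS AND PROOFS =====

-- digit encoding of a factor list, least-significant digit = first factor
def pvEncN : List Nat → Int
  | [] => 0
  | f :: rest => (f : Int) + 10 * pvEncN rest

theorem pvEncN_nonneg (l : List Nat) : 0 ≤ pvEncN l := by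
  induction l with
  | nil => simp [pvEncN]
  | cons f rest ih =>
    simp only [pvEncN]
    have hf : (0 : Int) ≤ (f : Int) := Int.natCast_nonneg f
    linarith

theorem pvAFactLoop_le_one (fuel : Nat) (liczba dzielnik czynniki mnoznik : Int)
    (h : liczba ≤ 1) : pvAFactLoop fuel liczba dzielnik czynniki mnoznik = czynniki := by
  cases fuel with
  | zero => rfl
  | succ fuel => simp only [pvAFactLoop]; rw [if_neg (by omega)]

-- a divisor with no smaller nontrivial divisor is the minimal prime factor
theorem pv_minFac_eq (n d : Nat) (hn : 1 < n) (hd2 : 2 ≤ d) (hdvd : d ∣ n)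
    (hinv : ∀ e, 2 ≤ e → e < d → ¬ e ∣ n) : n.minFac = d := by
  have h1 : n.minFac ≤ d := Nat.minFac_le_of_dvd hd2 hdvd
  have h2 : 2 ≤ n.minFac := (Nat.minFac_prime (by omega)).two_le
  by_contra hne
  exact hinv n.minFac h2 (by omega) (Nat.minFac_dvd n)

theorem pvAFactLoop_eq (fuel : Nat) : ∀ (n d : Nat) (cz m : Int), 1 < n → 2 ≤ d → d ≤ n →
    (∀ e, 2 ≤ e → e < d → ¬ e ∣ n) → 2 * n - d ≤ fuel →
    pvAFactLoop fuel (n : Int) (d : Int) cz m = cz + m * pvEncN (Nat.primeFactorsList n) := by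
  induction fuel with
  | zero => intro n d cz m hn hd hdn hinv hfuel; omega
  | succ fuel ih =>
    intro n d cz m hn hd hdn hinv hfuel
    have hn' : (1 : Int) < (n : Int) := by exact_mod_cast hn
    simp only [pvAFactLoop, if_pos hn', PySem.Int.mod_natCast, PySem.Int.floordiv_natCast]
    by_cases hdvd : d ∣ n
    · have hmod : ((n % d : Nat) : Int) = 0 := by
        simp [Nat.mod_eq_zero_of_dvd hdvd]
      rw [if_pos hmod]
      have hminfac : n.minFac = d := pv_minFac_eq n d hn hd hdvd hinv
      obtain ⟨k, hk⟩ : ∃ k, n = k + 2 := ⟨n - 2, by omega⟩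
      have hpf : Nat.primeFactorsList n = d :: Nat.primeFactorsList (n / d) := by
        rw [hk, Nat.primeFactorsList_add_two, ← hk, hminfac]
      have h2nd : 2 * (n / d) ≤ n := by
        nlinarith [Nat.div_mul_le_self n d, hd, Nat.zero_le (n / d)]
      by_cases hq : n / d = 1
      · have hnd : n = d := by
          obtain ⟨c, hc⟩ := hdvd
          rw [hc, Nat.mul_div_cancel_left c (by omega)] at hq
          rw [hc, hq, mul_one]
        rw [hq, Nat.cast_one]
        rw [pvAFactLoop_le_one fuel 1 (d : Int) _ _ (by norm_num)]
        rw [hpf, hq, Nat.primeFactorsList_one]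
        simp only [pvEncN]
        ring
      · have hq1 : 1 < n / d := by
          have : 0 < n / d := Nat.div_pos hdn (by omega)
          omega
        have hddq : d ≤ n / d := by
          by_contra hlt
          exact hinv (n / d) (by omega) (by omega) (Nat.div_dvd_of_dvd hdvd)
        have hinv' : ∀ e, 2 ≤ e → e < d → ¬ e ∣ (n / d) := fun e h2e hed hdv =>
          hinv e h2e hed (hdv.trans (Nat.div_dvd_of_dvd hdvd))
        rw [ih (n / d) d (cz + (d : Int) * m) (m * 10) hq1 hd hddq hinv' (by omega), hpf]
        simp only [pvEncN]
        ring
    · have hmod : ¬ ((n % d : Nat) : Int) = 0 := by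
        simp only [Nat.cast_eq_zero]
        exact fun h => hdvd (Nat.dvd_of_mod_eq_zero h)
      rw [if_neg hmod]
      have hdltn : d < n := by
        rcases Nat.lt_or_ge d n with h | h
        · exact h
        · exact absurd (by omega : d = n) (fun hh => hdvd (hh ▸ dvd_refl n))
      have hinv' : ∀ e, 2 ≤ e → e < d + 1 → ¬ e ∣ n := by
        intro e h2e hed
        rcases Nat.lt_or_ge e d with h | h
        · exact hinv e h2e h
        · have : e = d := by omega
          exact this ▸ hdvd
      have hcast : (d : Int) + 1 = ((d + 1 : Nat) : Int) := by push_cast; ring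
      rw [hcast, ih n (d + 1) cz m hn (by omega) (by omega) hinv' (by omega)]

theorem pvBFactLoop_eq (fuel : Nat) : ∀ (n d : Nat) (code place : Int), 1 < n → 2 ≤ d → d ≤ n →
    (∀ e, 2 ≤ e → e < d → ¬ e ∣ n) → n - d + 1 ≤ fuel →
    pvBFactLoop fuel (n : Int) (d : Int) code place
      = code + place * pvEncN (Nat.primeFactorsList n) := by
  induction fuel with
  | zero => intro n d code place hn hd hdn hinv hfuel; omega
  | succ fuel ih =>
    intro n d code place hn hd hdn hinv hfuel
    simp only [pvBFactLoop, PySem.Int.mod_natCast, PySem.Int.floordiv_natCast]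
    by_cases hguard : d * d ≤ n
    · rw [if_pos (by exact_mod_cast hguard : (d : Int) * (d : Int) ≤ (n : Int))]
      by_cases hdvd : d ∣ n
      · have hmod : ((n % d : Nat) : Int) = 0 := by
          simp [Nat.mod_eq_zero_of_dvd hdvd]
        rw [if_pos hmod]
        have hminfac : n.minFac = d := pv_minFac_eq n d hn hd hdvd hinv
        obtain ⟨k, hk⟩ : ∃ k, n = k + 2 := ⟨n - 2, by omega⟩
        have hpf : Nat.primeFactorsList n = d :: Nat.primeFactorsList (n / d) := by
          rw [hk, Nat.primeFactorsList_add_two, ← hk, hminfac]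
        have hddq : d ≤ n / d := (Nat.le_div_iff_mul_le (by omega)).mpr hguard
        have h2nd : 2 * (n / d) ≤ n := by
          nlinarith [Nat.div_mul_le_self n d, hd, Nat.zero_le (n / d)]
        have hq1 : 1 < n / d := by omega
        have hinv' : ∀ e, 2 ≤ e → e < d → ¬ e ∣ (n / d) := fun e h2e hed hdv =>
          hinv e h2e hed (hdv.trans (Nat.div_dvd_of_dvd hdvd))
        rw [ih (n / d) d (code + (d : Int) * place) (place * 10) hq1 hd hddq hinv' (by omega), hpf]
        simp only [pvEncN]
        ring
      · have hmod : ¬ ((n % d : Nat) : Int) = 0 := by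
          simp only [Nat.cast_eq_zero]
          exact fun h => hdvd (Nat.dvd_of_mod_eq_zero h)
        rw [if_neg hmod]
        have h2d : 2 * d ≤ n := by nlinarith
        have hinv' : ∀ e, 2 ≤ e → e < d + 1 → ¬ e ∣ n := by
          intro e h2e hed
          rcases Nat.lt_or_ge e d with h | h
          · exact hinv e h2e h
          · have : e = d := by omega
            exact this ▸ hdvd
        have hcast : (d : Int) + 1 = ((d + 1 : Nat) : Int) := by push_cast; ring
        rw [hcast, ih n (d + 1) code place hn (by omega) (by omega) hinv' (by omega)]
    · rw [if_neg (by exact_mod_cast hguard : ¬ (d : Int) * (d : Int) ≤ (n : Int))]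
      have hprime : n.Prime := by
        rw [Nat.prime_def_lt]
        refine ⟨hn, fun m hm hdm => ?_⟩
        by_contra hm1
        have hm0 : m ≠ 0 := by rintro rfl; simp at hdm; omega
        have hm2 : 2 ≤ m := by omega
        rcases Nat.lt_or_ge m d with hlt | hge
        · exact hinv m hm2 hlt hdm
        · obtain ⟨c, hc⟩ := hdm
          have hc1 : c ≠ 0 := by rintro rfl; omega
          have hcn1 : c ≠ 1 := by rintro rfl; omega
          have hcd : c < d := by nlinarith
          exact hinv c (by omega) hcd ⟨m, by rw [hc]; ring⟩
      rw [if_pos (by exact_mod_cast hn : (1 : Int) < (n : Int)),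
        Nat.primeFactorsList_prime hprime]
      simp only [pvEncN]
      ring

theorem pvRozklad_eq (l : Int) :
    pvRozklad l = if 1 < l then pvEncN (Nat.primeFactorsList l.toNat) else 0 := by
  by_cases hl : 1 < l
  · rw [if_pos hl]
    lift l to Nat using (by omega : (0 : Int) ≤ l) with n
    have hn : 1 < n := by exact_mod_cast hl
    have h2 : ((2 : Nat) : Int) = (2 : Int) := by norm_num
    unfold pvRozklad
    rw [Int.toNat_natCast, ← h2,
      pvAFactLoop_eq (2 * n + 1) n 2 0 1 hn (le_refl 2) (by omega)
        (fun e h2e hed => absurd h2e (by omega)) (by omega)]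
    ring
  · rw [if_neg hl]
    exact pvAFactLoop_le_one _ _ _ _ _ (by omega)

theorem pvFactorCode_eq (l : Int) :
    pvFactorCode l = if 1 < l then pvEncN (Nat.primeFactorsList l.toNat) else 0 := by
  by_cases hl : 1 < l
  · rw [if_pos hl]
    lift l to Nat using (by omega : (0 : Int) ≤ l) with n
    have hn : 1 < n := by exact_mod_cast hl
    have h2 : ((2 : Nat) : Int) = (2 : Int) := by norm_num
    unfold pvFactorCode
    rw [Int.toNat_natCast, ← h2,
      pvBFactLoop_eq n n 2 0 1 hn (le_refl 2) (by omega)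
        (fun e h2e hed => absurd h2e (by omega)) (by omega)]
    ring
  · rw [if_neg hl]
    by_cases hl0 : l ≤ 0
    · have : l.toNat = 0 := by omega
      unfold pvFactorCode
      rw [this]
      rfl
    · have : l = 1 := by omega
      subst this
      unfold pvFactorCode pvBFactLoop
      norm_num
  
theorem pvRozklad_eq_factorCode (l : Int) : pvRozklad l = pvFactorCode l := by
  rw [pvRozklad_eq, pvFactorCode_eq]

theorem pvRozklad_nonneg (l : Int) : 0 ≤ pvRozklad l := by
  rw [pvRozklad_eq]
  by_cases hl : 1 < l
  · rw [if_pos hl]; exact pvEncN_nonneg _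
  · rw [if_neg hl]

theorem pvDigits_pos (a : Nat) (ha : 0 < a) :
    pvDigits (a : Int) = ((a % 10 : Nat) : Int) :: pvDigits ((a / 10 : Nat) : Int) := by
  rw [pvDigits, dif_pos (by exact_mod_cast ha : (0:Int) < (a:Int))]
  have hm : PySem.Int.mod (a : Int) 10 = ((a % 10 : Nat) : Int) := by
    exact_mod_cast PySem.Int.mod_natCast a 10
  have hf : PySem.Int.floordiv (a : Int) 10 = ((a / 10 : Nat) : Int) := by
    exact_mod_cast PySem.Int.floordiv_natCast a 10
  rw [hm, hf]

theorem pvACmpLoop_eq (a : Nat) : ∀ (b : Nat) (w : Int),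
    pvACmpLoop (a : Int) (b : Int) w
      = w + (((pvDigits (a : Int)).zip (pvDigits (b : Int))).countP
          (fun p => p.1 == p.2 && p.1 != 0) : Int) := by
  induction a using Nat.strong_induction_on with
  | _ a ih =>
    intro b w
    by_cases ha : 0 < a
    · by_cases hb : 0 < b
      · have haI : (0 : Int) < (a : Int) := by exact_mod_cast ha
        have hbI : (0 : Int) < (b : Int) := by exact_mod_cast hb
        rw [pvACmpLoop, dif_pos ⟨haI, hbI⟩]
        rw [pvDigits_pos a ha, pvDigits_pos b hb]
        have hma : PySem.Int.mod (a : Int) 10 = ((a % 10 : Nat) : Int) := by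
          exact_mod_cast PySem.Int.mod_natCast a 10
        have hmb : PySem.Int.mod (b : Int) 10 = ((b % 10 : Nat) : Int) := by
          exact_mod_cast PySem.Int.mod_natCast b 10
        have hfa : PySem.Int.floordiv (a : Int) 10 = ((a / 10 : Nat) : Int) := by
          exact_mod_cast PySem.Int.floordiv_natCast a 10
        have hfb : PySem.Int.floordiv (b : Int) 10 = ((b / 10 : Nat) : Int) := by
          exact_mod_cast PySem.Int.floordiv_natCast b 10
        rw [hma, hmb, hfa, hfb]
        rw [ih (a / 10) (Nat.div_lt_self ha (by norm_num)) (b / 10) _]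
        simp only [List.zip_cons_cons, List.countP_cons, Bool.and_eq_true, beq_iff_eq,
          bne_iff_ne]
        by_cases hc : ((a % 10 : Nat) : Int) = ((b % 10 : Nat) : Int) ∧ ((a % 10 : Nat) : Int) ≠ 0
        · rw [if_pos hc, if_pos hc]
          push_cast
          ring
        · rw [if_neg hc, if_neg hc]
          push_cast
          ring
      · have hb0 : b = 0 := by omega
        subst hb0
        have hd0 : pvDigits ((0 : Nat) : Int) = [] := by rw [pvDigits]; simp
        rw [pvACmpLoop, dif_neg (by simp), hd0]
        simp
    · have ha0 : a = 0 := by omega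
      subst ha0
      have hd0 : pvDigits ((0 : Nat) : Int) = [] := by rw [pvDigits]; simp
      rw [pvACmpLoop, dif_neg (by simp), hd0]
      simp

-- ===== VERDICT (by name: the statement is the Claim_ definition above) =====
theorem rozklad_na_czynniki_z_jedna_wspolna_spec : Claim_equal_rozklad_na_czynniki_z_jedna_wspolna := by
  unfold Claim_equal_rozklad_na_czynniki_z_jedna_wspolna
  intro l1 l2 _
  unfold Spec_rozklad_na_czynniki_z_jedna_wspolna
  show (if pvACmpLoop (pvRozklad l1) (pvRozklad l2) 0 = 1 then true else false)
      = (((pvDigits (pvFactorCode l1)).zip (pvDigits (pvFactorCode l2))).countP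
          (fun p => p.1 == p.2 && p.1 != 0) == 1)
  rw [← pvRozklad_eq_factorCode l1, ← pvRozklad_eq_factorCode l2]
  have h1 : pvRozklad l1 = ((pvRozklad l1).toNat : Int) := by
    have := pvRozklad_nonneg l1; omega
  have h2 : pvRozklad l2 = ((pvRozklad l2).toNat : Int) := by
    have := pvRozklad_nonneg l2; omega
  rw [h1, h2, pvACmpLoop_eq]
  set cnt := ((pvDigits ((pvRozklad l1).toNat : Int)).zip
      (pvDigits ((pvRozklad l2).toNat : Int))).countP (fun p => p.1 == p.2 && p.1 != 0) with hcnt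
  by_cases hc : cnt = 1
  · simp [hc]
  · rw [if_neg (by omega : ¬ (0 : Int) + (cnt : Int) = 1)]
    simp [hc]
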